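-- pv_equiv track=rewrite | github.com/samadeusfp/SaCoFa | ExpMechDF/privatize_df_exp/privatize_df_exp.py | get_k_follows_trace
-- ===== SOURCE A (Python) =====
-- def get_k_follows_trace(activity_list):
--     k_follows_trace = dict()
--     counter_outer_loop= 0
--     for a in activity_list[:-1]:
--         k_follows_trace[a] = dict()
--         counter_inner_loop = 0
--         for b in activity_list:
--             if counter_inner_loop != counter_outer_loop and counter_inner_loop > counter_outer_loop:
--                 k_follows_trace[a][b] = counter_inner_loop - counter_outer_loop
--             counter_inner_loop +=1
--         counter_outer_loop += 1
--     return k_follows_trace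
-- ===== SOURCE B (Python) =====
-- def get_k_follows_trace(activity_list):
--     body = activity_list[:-1]
--     last = {a: i for i, a in enumerate(body)}
--     out = {}
--     for a in body:
--         if a not in out:
--             i = last[a]
--             out[a] = {b: k for k, b in enumerate(activity_list[i + 1:], 1)}
--     return out
-- ===== Notes on version B (the rewrite author's own statement) =====
-- stated objective: faster
-- what changed: Instead of rebuilding an inner dict by a full scan of the list for every position (overwriting duplicate keys repeatedly), B precomputes the last-occurrence index of each activity once and emits each distinct activity's inner dict directly from the suffix after that last occurrence.
import Mathlib
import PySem

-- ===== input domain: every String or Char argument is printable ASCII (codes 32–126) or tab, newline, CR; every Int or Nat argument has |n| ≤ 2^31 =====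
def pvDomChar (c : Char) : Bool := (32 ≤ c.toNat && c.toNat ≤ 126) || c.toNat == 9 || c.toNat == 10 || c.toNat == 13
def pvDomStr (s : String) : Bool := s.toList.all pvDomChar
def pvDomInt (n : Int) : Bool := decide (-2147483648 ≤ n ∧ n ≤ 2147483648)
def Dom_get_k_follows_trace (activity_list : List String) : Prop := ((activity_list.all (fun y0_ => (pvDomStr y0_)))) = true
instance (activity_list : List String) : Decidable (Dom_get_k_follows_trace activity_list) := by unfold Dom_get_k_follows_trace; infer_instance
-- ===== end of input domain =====

-- B precomputes each activity's last-occurrence index once and emits each distinct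
-- activity's inner dict directly from the suffix after it, instead of A's full rescan
-- per position; equivalence of the returned dict (as an insertion-ordered assoc list) is proved.


-- ===== PORT A =====
def get_k_follows_trace (activity_list : List String) : List (String × List (String × Int)) :=
  -- for a in activity_list[:-1]: build k_follows_trace[a] by scanning the whole list with an inner counter
  let res := (PySem.List.slice activity_list none (some (-1))).foldl
    (fun (st : PySem.Dict String (PySem.Dict String Int) × Int) a =>
      let inner := (activity_list.foldl
        (fun (st2 : PySem.Dict String Int × Int) b =>
          (if st2.2 ≠ st.2 ∧ st2.2 > st.2 then st2.1.insert b (st2.2 - st.2) else st2.1,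
           st2.2 + 1))
        (PySem.Dict.empty, (0 : Int))).1
      (st.1.insert a inner, st.2 + 1))
    (PySem.Dict.empty, (0 : Int))
  (res.1.items).map (fun p => (p.1, p.2.items))

-- ===== PORT B =====
def get_k_follows_trace_alt (activity_list : List String) : List (String × List (String × Int)) :=
  let body := PySem.List.slice activity_list none (some (-1))
  -- last = {a: i for i, a in enumerate(body)}
  let last : PySem.Dict String Int :=
    (PySem.List.enumerate body 0).foldl (fun d p => d.insert p.2 p.1) PySem.Dict.empty
  let out := body.foldl
    (fun (out : PySem.Dict String (List (String × Int))) a =>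
      if out.contains a then out
      else
        -- i = last[a]  (a is always a key of last; getD's default is never used)
        let i := last.getD a 0
        -- {b: k for k, b in enumerate(activity_list[i+1:], 1)}
        let inner := (PySem.List.enumerate (PySem.List.slice activity_list (some (i + 1)) none) 1).foldl
          (fun (d : PySem.Dict String Int) p => d.insert p.2 p.1) PySem.Dict.empty
        out.insert a inner.items)
    PySem.Dict.empty
  out.items

-- ===== PRECONDITION & SPEC =====
def Spec_get_k_follows_trace (activity_list : List String) (out : List (String × List (String × Int))) : Prop := out = get_k_follows_trace_alt activity_list
instance (activity_list : List String) (out : List (String × List (String × Int))) : Decidable (Spec_get_k_follows_trace activity_list out) := by unfold Spec_get_k_follows_trace; infer_instance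

-- ===== CLAIM (what is proved, stated in full; the proofs are below) =====
def Claim_equal_get_k_follows_trace : Prop := ∀ (activity_list : List String), Dom_get_k_follows_trace activity_list → Spec_get_k_follows_trace activity_list (get_k_follows_trace activity_list)

-- ===== LEMMAS AND PROOFS =====

-- A's inner loop as a function of the outer counter
def innerAfun (l : List String) (co : Int) : PySem.Dict String Int :=
  (l.foldl
    (fun (st2 : PySem.Dict String Int × Int) b =>
      (if st2.2 ≠ co ∧ st2.2 > co then st2.1.insert b (st2.2 - co) else st2.1, st2.2 + 1))
    (PySem.Dict.empty, (0 : Int))).1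

-- B's inner dict as a function of the last-occurrence index
def innerBfun (l : List String) (i : Int) : PySem.Dict String Int :=
  (PySem.List.enumerate (PySem.List.slice l (some (i + 1)) none) 1).foldl
    (fun (d : PySem.Dict String Int) p => d.insert p.2 p.1) PySem.Dict.empty

theorem Aport_eq (l : List String) :
    get_k_follows_trace l =
      (((PySem.List.slice l none (some (-1))).foldl
        (fun (st : PySem.Dict String (PySem.Dict String Int) × Int) a =>
          (st.1.insert a (innerAfun l st.2), st.2 + 1))
        (PySem.Dict.empty, (0 : Int))).1.items).map (fun p => (p.1, p.2.items)) := rfl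

theorem Bport_eq (l : List String) :
    get_k_follows_trace_alt l =
      ((PySem.List.slice l none (some (-1))).foldl
        (fun (out : PySem.Dict String (List (String × Int))) a =>
          if out.contains a then out
          else out.insert a (innerBfun l
            (((PySem.List.enumerate (PySem.List.slice l none (some (-1))) 0).foldl
              (fun d p => d.insert p.2 p.1) PySem.Dict.empty).getD a 0)).items)
        PySem.Dict.empty).items := rfl

-- the plain "insert with a running counter" loop both inner loops reduce to
def stepI (st : PySem.Dict String Int × Int) (b : String) : PySem.Dict String Int × Int :=
  (st.1.insert b st.2, st.2 + 1)

theorem innerA_past (co : Int) (l : List String) :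
    ∀ (c : Int) (d : PySem.Dict String Int), co < c →
      (l.foldl
        (fun (st2 : PySem.Dict String Int × Int) b =>
          (if st2.2 ≠ co ∧ st2.2 > co then st2.1.insert b (st2.2 - co) else st2.1, st2.2 + 1))
        (d, c)).1
      = (l.foldl stepI (d, c - co)).1 := by
  induction l with
  | nil => intro c d h; rfl
  | cons b t ih =>
    intro c d h
    have hcond : c ≠ co ∧ c > co := ⟨ne_of_gt h, h⟩
    simp only [List.foldl_cons, if_pos hcond, stepI]
    rw [ih (c + 1) (d.insert b (c - co)) (by omega)]
    have h2 : c + 1 - co = c - co + 1 := by omega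
    rw [h2]

theorem innerA_pre (co : Int) (l : List String) :
    ∀ (c : Int) (d : PySem.Dict String Int), 0 ≤ c → c ≤ co →
      (l.foldl
        (fun (st2 : PySem.Dict String Int × Int) b =>
          (if st2.2 ≠ co ∧ st2.2 > co then st2.1.insert b (st2.2 - co) else st2.1, st2.2 + 1))
        (d, c)).1
      = ((l.drop (co - c + 1).toNat).foldl stepI (d, 1)).1 := by
  induction l with
  | nil => intro c d h0 h; simp
  | cons b t ih =>
    intro c d h0 h
    have hcond : ¬ (c ≠ co ∧ c > co) := by omega
    simp only [List.foldl_cons, if_neg hcond]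
    have hdrop : (co - c + 1).toNat = (co - (c + 1) + 1).toNat + 1 := by omega
    rw [hdrop, List.drop_succ_cons]
    rcases lt_or_eq_of_le h with hlt | heq
    · exact ih (c + 1) d (by omega) (by omega)
    · have : (co - (c + 1) + 1).toNat = 0 := by omega
      rw [this, List.drop_zero, innerA_past co t (c + 1) d (by omega)]
      have : c + 1 - co = 1 := by omega
      rw [this]

theorem enum_fold_eq (s : List String) :
    ∀ (c : Int) (d : PySem.Dict String Int),
      (PySem.List.enumerate s c).foldl (fun d p => d.insert p.2 p.1) d = (s.foldl stepI (d, c)).1 := by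
  induction s with
  | nil => intro c d; rfl
  | cons b t ih =>
    intro c d
    rw [PySem.List.enumerate_cons, List.foldl_cons, List.foldl_cons, ih]
    rfl

theorem inner_eq (l : List String) (i : Int) (hi : 0 ≤ i) : innerAfun l i = innerBfun l i := by
  unfold innerAfun innerBfun
  rw [innerA_pre i l 0 PySem.Dict.empty le_rfl hi,
      PySem.List.slice_from l (by omega : (0:Int) ≤ i + 1), enum_fold_eq]
  have : (i + 1).toNat = (i - 0 + 1).toNat := by omega
  rw [this]

-- last write wins: getD after an "insert (snd, G fst)" loop is G of the last matching index
theorem getD_fold_last {V : Type} (G : Int → V) (a : String) (dflt : V) :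
    ∀ (ps : List (Int × String)) (d : PySem.Dict String V),
      (ps.foldl (fun d p => d.insert p.2 (G p.1)) d).getD a dflt =
        (match (ps.filter (fun p => p.2 == a)).getLast? with
         | some p => G p.1
         | none => d.getD a dflt) := by
  intro ps
  induction ps with
  | nil => intro d; rfl
  | cons p t ih =>
    intro d
    rw [List.foldl_cons, ih, List.filter_cons]
    by_cases hpa : p.2 = a
    · rw [if_pos (by simp [hpa])]
      cases htf : t.filter (fun p => p.2 == a) with
      | nil => simp [hpa]
      | cons q r =>
        rw [List.getLast?_cons_cons]
        rfl
    · rw [if_neg (by simp [hpa])]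
      cases htf : t.filter (fun p => p.2 == a) with
      | nil =>
        have hne : a ≠ p.2 := fun h => hpa h.symm
        simp [PySem.Dict.getD_insert, hne]
      | cons q r => rfl

-- keys / getD / Nodup of B's skip-if-present loop
theorem Bfold_keys {V : Type} (H : String → V) :
    ∀ (bs : List String) (d : PySem.Dict String V),
      (bs.foldl (fun d a => if d.contains a then d else d.insert a (H a)) d).keys
        = PySem.Set.update d.keys bs := by
  intro bs
  induction bs with
  | nil => intro d; rfl
  | cons a t ih =>
    intro d
    rw [List.foldl_cons]
    by_cases hc : d.contains a = true
    · rw [if_pos hc, ih]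
      have : PySem.Set.add d.keys a = d.keys := by
        have := (PySem.Dict.contains_iff_mem_keys d a).1 hc
        simp [PySem.Set.add, PySem.Set.contains, this]
      simp [PySem.Set.update, this]
    · rw [if_neg hc, ih, PySem.Dict.keys_insert_of_not_contains d (H a) (by simpa using hc)]
      have : PySem.Set.add d.keys a = d.keys ++ [a] := by
        have : a ∉ d.keys := fun hm => hc ((PySem.Dict.contains_iff_mem_keys d a).2 hm)
        simp [PySem.Set.add, PySem.Set.contains, this]
      simp [PySem.Set.update, this]

theorem Bfold_nodup {V : Type} (H : String → V) :
    ∀ (bs : List String) (d : PySem.Dict String V), d.keys.Nodup →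
      (bs.foldl (fun d a => if d.contains a then d else d.insert a (H a)) d).keys.Nodup := by
  intro bs
  induction bs with
  | nil => intro d h; exact h
  | cons a t ih =>
    intro d h
    rw [List.foldl_cons]
    by_cases hc : d.contains a = true
    · rw [if_pos hc]; exact ih d h
    · rw [if_neg hc]
      refine ih _ ?_
      rw [PySem.Dict.keys_insert_of_not_contains d (H a) (by simpa using hc)]
      refine List.nodup_append.2 ⟨h, List.nodup_singleton a, ?_⟩
      intro x hx b hb
      have hb' : b = a := List.mem_singleton.1 hb
      subst hb'
      exact fun hxa => hc ((PySem.Dict.contains_iff_mem_keys d b).2 (hxa ▸ hx))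

theorem Bfold_getD {V : Type} (H : String → V) (x : String) (dflt : V) :
    ∀ (bs : List String) (d : PySem.Dict String V),
      (bs.foldl (fun d a => if d.contains a then d else d.insert a (H a)) d).getD x dflt
        = if d.contains x then d.getD x dflt else if x ∈ bs then H x else dflt := by
  intro bs
  induction bs with
  | nil =>
    intro d
    by_cases h : d.contains x = true
    · simp [h]
    · simp only [List.foldl_nil, List.not_mem_nil, if_neg h, if_false]
      exact PySem.Dict.getD_of_not_contains d dflt (by simpa using h)
  | cons a t ih =>
    intro d
    rw [List.foldl_cons]
    by_cases hc : d.contains a = true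
    · rw [if_pos hc, ih]
      by_cases hx : x = a
      · simp [hx, hc]
      · simp [List.mem_cons, hx]
    · rw [if_neg hc, ih]
      by_cases hx : x = a
      · subst hx
        simp [hc]
      · rw [PySem.Dict.contains_insert]
        have hb : (x == a) = false := by simp [hx]
        simp [hb, PySem.Dict.getD_insert, hx, List.mem_cons]

-- a member of body has a last-occurrence record in enumerate body 0, with a nonnegative index
theorem lastRecord (body : List String) (a : String) (ha : a ∈ body) :
    ∃ p : Int × String,
      ((PySem.List.enumerate body 0).filter (fun p => p.2 == a)).getLast? = some p ∧ 0 ≤ p.1 := by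
  obtain ⟨k, hk, hget⟩ := List.mem_iff_getElem.1 ha
  have hmem : ((0 : Int) + (k : Int), a) ∈ PySem.List.enumerate body 0 := by
    rw [PySem.List.mem_enumerate_iff]
    exact ⟨k, hk, by rw [hget]⟩
  have hfmem : ((0 : Int) + (k : Int), a) ∈ (PySem.List.enumerate body 0).filter (fun p => p.2 == a) :=
    List.mem_filter.2 ⟨hmem, by simp⟩
  have hne : (PySem.List.enumerate body 0).filter (fun p => p.2 == a) ≠ [] :=
    List.ne_nil_of_mem hfmem
  obtain ⟨p, hp⟩ := Option.ne_none_iff_exists'.1 (mt List.getLast?_eq_none_iff.1 hne)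
  refine ⟨p, hp, ?_⟩
  have hpmem : p ∈ (PySem.List.enumerate body 0).filter (fun p => p.2 == a) :=
    List.mem_of_getLast? hp
  have := (List.mem_filter.1 hpmem).1
  obtain ⟨k', _, hpk⟩ := (PySem.List.mem_enumerate_iff _ _ _).1 this
  rw [hpk]; omega

theorem main_eq (l : List String) : get_k_follows_trace l = get_k_follows_trace_alt l := by
  rw [Aport_eq, Bport_eq]
  set body := PySem.List.slice l none (some (-1)) with hbody
  -- A's outer pair-fold as an enumerate fold
  have hApair : ∀ (bs : List String) (c : Int) (d : PySem.Dict String (PySem.Dict String Int)),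
      (bs.foldl (fun st a => (st.1.insert a (innerAfun l st.2), st.2 + 1)) (d, c)).1
        = (PySem.List.enumerate bs c).foldl (fun d p => d.insert p.2 (innerAfun l p.1)) d := by
    intro bs
    induction bs with
    | nil => intro c d; rfl
    | cons a t ih =>
      intro c d
      rw [List.foldl_cons, PySem.List.enumerate_cons, List.foldl_cons, ih]
  rw [hApair]
  set dA := (PySem.List.enumerate body 0).foldl (fun d p => d.insert p.2 (innerAfun l p.1))
      (PySem.Dict.empty : PySem.Dict String (PySem.Dict String Int)) with hdA
  set H : String → List (String × Int) := fun a =>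
    (innerBfun l (((PySem.List.enumerate body 0).foldl (fun d p => d.insert p.2 p.1)
      PySem.Dict.empty).getD a 0)).items with hH
  set dB := body.foldl (fun out a => if out.contains a then out else out.insert a (H a))
      (PySem.Dict.empty : PySem.Dict String (List (String × Int))) with hdB
  -- keys
  have hkA : dA.keys = PySem.Set.ofList body := by
    rw [hdA, PySem.Dict.keys_foldl_insert_key (key := fun p : Int × String => p.2)
          (f := fun d p => innerAfun l p.1)]
    simp [PySem.List.map_snd_enumerate, PySem.Set.ofList_eq_foldl, PySem.Set.update,
          PySem.Dict.keys_empty]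
  have hkB : dB.keys = PySem.Set.ofList body := by
    rw [hdB, Bfold_keys]
    simp [PySem.Set.ofList_eq_foldl, PySem.Set.update, PySem.Dict.keys_empty]
  have hndA : dA.keys.Nodup := by
    rw [hdA]
    exact PySem.Dict.nodup_keys_foldl_insert_key _ _ _ _ PySem.Dict.nodup_keys_empty
  have hndB : dB.keys.Nodup := Bfold_nodup H body PySem.Dict.empty PySem.Dict.nodup_keys_empty
  -- value agreement on keys
  have hval : ∀ a ∈ PySem.Set.ofList body,
      (dA.getD a PySem.Dict.empty).items = dB.getD a [] := by
    intro a hamem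
    have ha : a ∈ body := (PySem.Set.mem_ofList body a).1 hamem
    obtain ⟨p, hp, hp0⟩ := lastRecord body a ha
    have hA : dA.getD a PySem.Dict.empty = innerAfun l p.1 := by
      rw [hdA, getD_fold_last (G := innerAfun l), hp]
    have hlast : ((PySem.List.enumerate body 0).foldl (fun d p => d.insert p.2 p.1)
        PySem.Dict.empty).getD a 0 = p.1 := by
      rw [getD_fold_last (G := fun i => i), hp]
    have hB : dB.getD a [] = H a := by
      rw [hdB, Bfold_getD]
      simp [PySem.Dict.contains_empty, ha]
    rw [hA, hB, hH]
    simp only [hlast]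
    rw [inner_eq l p.1 hp0]
  -- items of both dicts
  rw [PySem.Dict.items_eq_map_keys dA hndA PySem.Dict.empty,
      PySem.Dict.items_eq_map_keys dB hndB ([] : List (String × Int)),
      hkA, hkB, List.map_map]
  exact List.map_congr_left (fun a ha => by
    simp only [Function.comp]
    rw [hval a ha])

-- ===== VERDICT (by name: the statement is the Claim_ definition above) =====
theorem get_k_follows_trace_spec : Claim_equal_get_k_follows_trace := by
  intro activity_list _
  unfold Spec_get_k_follows_trace
  exact main_eq activity_list
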